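-- pv_equiv track=rewrite | github.com/Greenun/algorithmPractice | coalgo/string_explosion.py | solution
-- ===== SOURCE A (Python) =====
-- def solution(origin, explode):
-- 	stack = list()
-- 	length = len(explode)
-- 	s_len = 0
-- 	for o in origin:
-- 		if s_len >= length:
-- 			if all([stack[j] == explode[j] for j in range(-1, -1*length-1, -1)]):
-- 				for _ in range(length):
-- 					stack.pop()
-- 				s_len -= length
-- 		stack.append(o)
-- 		s_len += 1
-- 	if s_len >= length:
-- 		if all([stack[j] == explode[j] for j in range(-1, -1*length-1, -1)]):
-- 			stack = stack[:-1*length]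
-- 			s_len -= length
-- 	if not stack:
-- 		return "FRULA"
-- 	return ''.join(stack)
-- ===== SOURCE B (Python) =====
-- def solution(origin, explode):
--     m = len(explode)
--     MOD = (1 << 61) - 1
--     BASE = 131
--     target = 0
--     for c in explode:
--         target = (target * BASE + ord(c)) % MOD
--     pm = 1
--     for _ in range(m):
--         pm = pm * BASE % MOD
--     ex = list(explode)
--     stack = []
--     hashes = [0]  # hashes[i] = rolling hash of stack[:i]
--     for ch in origin:
--         stack.append(ch)
--         hashes.append((hashes[-1] * BASE + ord(ch)) % MOD)
--         if m and len(stack) >= m: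
--             h = (hashes[-1] - hashes[-1 - m] * pm) % MOD
--             if h == target and stack[-m:] == ex:
--                 del stack[-m:]
--                 del hashes[-m:]
--     if not stack:
--         return "FRULA"
--     return ''.join(stack)
-- ===== Notes on version B (the rewrite author's own statement) =====
-- stated objective: alternative
-- what changed: B pushes each character and then tests the stack suffix with a rolling-hash window over a maintained prefix-hash array (verifying by a direct slice comparison only on a hash hit), instead of A's reversed-index list-comprehension comparison of the last |explode| characters before each push.
-- intended difference: On an empty explode pattern with nonempty origin, A always returns "FRULA" (an artefact of stack[:-0] slicing away the whole stack at the end), while B returns origin unchanged, the intended result of removing occurrences of the empty string. — e.g. on solution("x", ""): A returns "FRULA", B returns "x"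
import Mathlib
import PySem

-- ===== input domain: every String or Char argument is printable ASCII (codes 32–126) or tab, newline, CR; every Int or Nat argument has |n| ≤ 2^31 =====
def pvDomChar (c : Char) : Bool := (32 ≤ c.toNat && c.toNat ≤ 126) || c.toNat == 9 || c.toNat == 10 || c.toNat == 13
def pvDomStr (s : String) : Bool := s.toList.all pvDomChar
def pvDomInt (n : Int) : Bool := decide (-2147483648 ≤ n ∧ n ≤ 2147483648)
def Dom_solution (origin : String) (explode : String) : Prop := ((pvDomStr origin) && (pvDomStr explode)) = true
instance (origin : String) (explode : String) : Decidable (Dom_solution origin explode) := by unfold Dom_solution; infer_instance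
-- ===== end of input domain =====

-- B is an alternative algorithm: it pushes each character and then tests the stack suffix with a
-- rolling-hash window over a maintained prefix-hash array (verifying by a direct slice comparison
-- only on a hash hit), instead of A's reversed-index comparison before each push.

-- ===== PORT A =====
-- all([stack[j] == explode[j] for j in range(-1, -1*length-1, -1)])
def pvChkA (stack eL : List Char) : Bool :=
  (PySem.List.pyRange (-1) (-1 * (eL.length : Int) - 1) (-1)).all
    (fun j => PySem.List.pyGet? stack j == PySem.List.pyGet? eL j)

-- the body of A's `for o in origin` loop; state = (stack, s_len)
def pvStepA (eL : List Char) (st : List Char × Int) (o : Char) : List Char × Int :=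
  let p :=
    if (eL.length : Int) ≤ st.2 then
      if pvChkA st.1 eL then
        -- `for _ in range(length): stack.pop()` removes the last `length` elements (s_len ≥ length guards it)
        (st.1.take (st.1.length - eL.length), st.2 - (eL.length : Int))
      else st
    else st
  (p.1 ++ [o], p.2 + 1)

def solution (origin : String) (explode : String) : String :=
  let eL := explode.toList
  let st := origin.toList.foldl (pvStepA eL) ([], 0)
  let stack :=
    if (eL.length : Int) ≤ st.2 ∧ pvChkA st.1 eL then
      PySem.List.slice st.1 none (some (-1 * (eL.length : Int)))   -- stack[:-1*length]
    else st.1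
  if stack = [] then "FRULA" else String.ofList stack   -- ''.join(stack)

-- ===== PORT B =====
def pvMod : Int := (1 <<< 61) - 1
def pvHStep (h : Int) (c : Char) : Int := PySem.Int.mod (h * 131 + (c.toNat : Int)) pvMod

-- the body of B's `for ch in origin` loop; state = (stack, hashes)
def pvStepB (m : Nat) (eL : List Char) (target pm : Int) (st : List Char × List Int) (ch : Char) :
    List Char × List Int :=
  let stack := st.1 ++ [ch]
  -- hashes.append((hashes[-1] * BASE + ord(ch)) % MOD); hashes is never empty, so hashes[-1] never raises
  let hashes := st.2 ++ [pvHStep (PySem.List.pyGetD st.2 (-1) 0) ch]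
  if m ≠ 0 ∧ m ≤ stack.length then
    let h := PySem.Int.mod
      (PySem.List.pyGetD hashes (-1) 0 - PySem.List.pyGetD hashes (-1 - (m : Int)) 0 * pm) pvMod
    if h = target ∧ PySem.List.slice stack (some (-(m : Int))) none = eL then   -- stack[-m:] == ex
      (stack.take (stack.length - m), hashes.take (hashes.length - m))   -- del stack[-m:]; del hashes[-m:]
    else (stack, hashes)
  else (stack, hashes)

def solution_alt (origin : String) (explode : String) : String :=
  let eL := explode.toList
  let m := eL.length
  let target := eL.foldl pvHStep 0
  let pm := (List.range m).foldl (fun p _ => PySem.Int.mod (p * 131) pvMod) 1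
  let st := origin.toList.foldl (pvStepB m eL target pm) ([], [0])
  if st.1 = [] then "FRULA" else String.ofList st.1   -- ''.join(stack)

-- ===== PRECONDITION & SPEC =====
-- On an empty explode pattern with nonempty origin, A always returns "FRULA" (an artefact of
-- stack[:-0] slicing away the whole stack at the end), while B returns origin unchanged, the
-- intended result of removing occurrences of the empty string.
def D_solution (origin : String) (explode : String) : Prop :=
  explode = "" ∧ origin ≠ "" ∧ origin ≠ "FRULA"
instance (origin : String) (explode : String) : Decidable (D_solution origin explode) := by
  unfold D_solution; infer_instance

def Spec_solution (origin : String) (explode : String) (out : String) : Prop :=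
  ¬ D_solution origin explode → out = solution_alt origin explode
instance (origin : String) (explode : String) (out : String) : Decidable (Spec_solution origin explode out) := by unfold Spec_solution; infer_instance

def pvDiffWitness_solution : String × String := ("x", "")
def pvDiffWitnessOut_solution : String × String := ("FRULA", "x")

-- ===== CLAIM (what is proved, stated in full; the proofs are below) =====
def Claim_unchanged_solution : Prop := ∀ (origin : String) (explode : String), Dom_solution origin explode → Spec_solution origin explode (solution origin explode)
def Claim_changed_solution : Prop := Dom_solution (pvDiffWitness_solution.1) (pvDiffWitness_solution.2) ∧ D_solution (pvDiffWitness_solution.1) (pvDiffWitness_solution.2) ∧ solution (pvDiffWitness_solution.1) (pvDiffWitness_solution.2) = pvDiffWitnessOut_solution.1 ∧ solution_alt (pvDiffWitness_solution.1) (pvDiffWitness_solution.2) = pvDiffWitnessOut_solution.2 ∧ pvDiffWitnessOut_solution.1 ≠ pvDiffWitnessOut_solution.2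
def Claim_exact_solution : Prop := ∀ (origin : String) (explode : String), Dom_solution origin explode → D_solution origin explode → solution origin explode ≠ solution_alt origin explode

-- ===== LEMMAS AND PROOFS =====

-- The common mathematical core: push a character, then remove the explode suffix if present.
def pvRed (eL S : List Char) : List Char :=
  if eL.length ≤ S.length ∧ S.drop (S.length - eL.length) = eL then S.take (S.length - eL.length) else S

def pvStep (eL : List Char) (S : List Char) (c : Char) : List Char := pvRed eL (S ++ [c])

def pvH (S : List Char) : Int := S.foldl pvHStep 0

def pvPH (S : List Char) : List Int := (List.range (S.length + 1)).map (fun i => pvH (S.take i))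

def pvG (h : Int) (v : List Char) : Int := v.foldl (fun h c => h * 131 + (c.toNat : Int)) h

def pvPm (m : Nat) : Int := (List.range m).foldl (fun p _ => PySem.Int.mod (p * 131) pvMod) 1

lemma pvMod_pos : (0 : Int) < pvMod := by decide

lemma pvHStep_eq (h : Int) (c : Char) : pvHStep h c = (h * 131 + (c.toNat : Int)) % pvMod := by
  simp [pvHStep, PySem.Int.mod_eq_emod_of_pos pvMod_pos]

lemma pvHStep_mod_self (h : Int) (c : Char) : pvHStep h c % pvMod = pvHStep h c := by
  simp [pvHStep_eq, Int.emod_emod_of_dvd _ dvd_rfl]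

lemma pvGetCongr {α : Type} (xs : List α) {i j : Nat} (h : i = j) (hj : j < xs.length) :
    xs[i]'(h ▸ hj) = xs[j]'hj := by subst h; rfl

-- ---- A's suffix check ----
lemma pvChkA_iff (stack eL : List Char) (h : eL.length ≤ stack.length) :
    pvChkA stack eL = true ↔ stack.drop (stack.length - eL.length) = eL := by
  unfold pvChkA
  have e1 : (-1 : Int) - (-1 * (eL.length : Int) - 1) = (eL.length : Int) := by ring
  have ek : ∀ k : Nat, (-1 : Int) - (k : Int) = -(((k + 1 : Nat)) : Int) := by
    intro k; push_cast; ring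
  rw [PySem.List.pyRange_neg_one, e1, Int.toNat_natCast, List.all_map, List.all_eq_true]
  constructor
  · intro hall
    apply List.ext_getElem (by simp; omega)
    intro i h1 h2
    have hi : i < eL.length := h2
    have hk := hall (eL.length - 1 - i) (by rw [List.mem_range]; omega)
    simp only [Function.comp] at hk
    rw [ek, PySem.List.pyGet?_neg_natCast stack (eL.length - 1 - i + 1) (by omega) (by omega),
        PySem.List.pyGet?_neg_natCast eL (eL.length - 1 - i + 1) (by omega) (by omega)] at hk
    rw [show stack.length - (eL.length - 1 - i + 1) = stack.length - eL.length + i by omega,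
        show eL.length - (eL.length - 1 - i + 1) = i by omega] at hk
    rw [List.getElem?_eq_getElem (by omega), List.getElem?_eq_getElem (by omega)] at hk
    rw [List.getElem_drop]
    exact Option.some_inj.mp (by simpa using hk)
  · intro hd k hk
    rw [List.mem_range] at hk
    simp only [Function.comp]
    rw [ek, PySem.List.pyGet?_neg_natCast stack (k + 1) (by omega) (by omega),
        PySem.List.pyGet?_neg_natCast eL (k + 1) (by omega) (by omega)]
    rw [List.getElem?_eq_getElem (by omega), List.getElem?_eq_getElem (by omega)]
    simp only [beq_iff_eq, Option.some_inj]
    have hq : (stack.drop (stack.length - eL.length))[eL.length - (k + 1)]? = eL[eL.length - (k + 1)]? := by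
      rw [hd]
    rw [List.getElem?_drop,
        show stack.length - eL.length + (eL.length - (k + 1)) = stack.length - (k + 1) by omega] at hq
    rw [List.getElem?_eq_getElem (by omega), List.getElem?_eq_getElem (by omega)] at hq
    exact Option.some_inj.mp hq

-- A's step on a state with s_len = len(stack) is: reduce, then push.
lemma pvStepA_eq (eL : List Char) (S : List Char) (c : Char) :
    pvStepA eL (S, (S.length : Int)) c = (pvRed eL S ++ [c], (((pvRed eL S ++ [c]).length : Nat) : Int)) := by
  simp only [pvStepA, pvRed]
  by_cases h : eL.length ≤ S.length
  · rw [if_pos (by exact_mod_cast h : ((eL.length : Int) ≤ ((S.length : Nat) : Int)))]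
    by_cases hc : S.drop (S.length - eL.length) = eL
    · rw [if_pos ((pvChkA_iff S eL h).mpr hc), if_pos ⟨h, hc⟩]
      refine Prod.ext rfl ?_
      simp only [List.length_append, List.length_take, List.length_cons, List.length_nil]
      push_cast [Nat.min_def]
      split_ifs <;> omega
    · rw [if_neg (by rw [pvChkA_iff S eL h]; exact hc), if_neg (by tauto)]
      refine Prod.ext rfl ?_
      simp only [List.length_append, List.length_cons, List.length_nil]
      push_cast
      ring
  · rw [if_neg (fun hh => h (by exact_mod_cast hh)), if_neg (fun hh => h hh.1)]
    refine Prod.ext rfl ?_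
    simp only [List.length_append, List.length_cons, List.length_nil]
    push_cast
    ring

def pvFinA (eL : List Char) (st : List Char × Int) : List Char :=
  if (eL.length : Int) ≤ st.2 ∧ pvChkA st.1 eL then
    PySem.List.slice st.1 none (some (-1 * (eL.length : Int)))
  else st.1

-- A's final check-and-slice equals pvRed for a nonempty pattern.
lemma pvFinA_eq (eL S : List Char) (hm : eL ≠ []) :
    pvFinA eL (S, ((S.length : Nat) : Int)) = pvRed eL S := by
  have hm0 : 0 < eL.length := by
    cases eL with
    | nil => exact absurd rfl hm
    | cons a t => simp
  unfold pvFinA pvRed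
  dsimp only
  by_cases h : eL.length ≤ S.length
  · by_cases hc : S.drop (S.length - eL.length) = eL
    · rw [if_pos ⟨by exact_mod_cast h, (pvChkA_iff S eL h).mpr hc⟩, if_pos ⟨h, hc⟩, neg_one_mul]
      exact PySem.List.slice_to_neg_natCast S eL.length hm0
    · rw [if_neg (fun hh => hc ((pvChkA_iff S eL h).mp hh.2)), if_neg (by tauto)]
  · rw [if_neg (fun hh => h (by exact_mod_cast hh.1)), if_neg (fun hh => h hh.1)]

lemma A_fold (eL : List Char) (hm : eL ≠ []) :
    ∀ (l S : List Char),
      pvFinA eL (l.foldl (pvStepA eL) (S, ((S.length : Nat) : Int)))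
        = l.foldl (pvStep eL) (pvRed eL S) := by
  intro l
  induction l with
  | nil => intro S; exact pvFinA_eq eL S hm
  | cons c l ih =>
    intro S
    rw [List.foldl_cons, pvStepA_eq, ih (pvRed eL S ++ [c]), List.foldl_cons]
    rfl

-- ---- B's rolling hash ----
lemma pvH_append_singleton (S : List Char) (c : Char) : pvH (S ++ [c]) = pvHStep (pvH S) c := by
  simp [pvH, List.foldl_append]

lemma pvPH_length (S : List Char) : (pvPH S).length = S.length + 1 := by simp [pvPH]

lemma pvPH_last (S : List Char) : PySem.List.pyGetD (pvPH S) (-1) 0 = pvH S := by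
  rw [PySem.List.pyGetD_neg_ofNat (pvPH S) 1 0 (by norm_num) (by simp [pvPH_length])]
  simp [pvPH]

lemma pvPH_window (S : List Char) (m : Nat) (hm : m ≤ S.length) :
    PySem.List.pyGetD (pvPH S) (-1 - (m : Int)) 0 = pvH (S.take (S.length - m)) := by
  rw [show (-1 : Int) - (m : Int) = -(((m + 1 : Nat)) : Int) by push_cast; ring]
  rw [PySem.List.pyGetD_neg_natCast (pvPH S) (m + 1) 0 (by omega) (by rw [pvPH_length]; omega)]
  have hidx : (pvPH S).length - (m + 1) = S.length - m := by rw [pvPH_length]; omega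
  rw [pvGetCongr (pvPH S) hidx (by rw [pvPH_length]; omega)]
  simp [pvPH]

lemma pvPH_append (S : List Char) (c : Char) :
    pvPH (S ++ [c]) = pvPH S ++ [pvH (S ++ [c])] := by
  unfold pvPH
  rw [List.length_append, List.length_cons, List.length_nil, List.range_succ, List.map_append]
  congr 1
  · apply List.map_congr_left
    intro i hi
    rw [List.mem_range] at hi
    rw [List.take_append_of_le_length (by omega)]
  · simp [List.take_of_length_le]

lemma pvPH_take (S : List Char) (k : Nat) (hk : k ≤ S.length) :
    (pvPH S).take (k + 1) = pvPH (S.take k) := by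
  unfold pvPH
  rw [← List.map_take, List.take_range, Nat.min_eq_left (by omega),
      List.length_take, Nat.min_eq_left hk]
  apply List.map_congr_left
  intro i hi
  rw [List.mem_range] at hi
  rw [List.take_take, Nat.min_eq_left (by omega)]

lemma pvG_cong : ∀ (v : List Char) (a b : Int), a % pvMod = b % pvMod →
    (v.foldl pvHStep a) % pvMod = pvG b v % pvMod := by
  intro v
  induction v with
  | nil => intro a b h; exact h
  | cons c v ih =>
    intro a b h
    show (v.foldl pvHStep (pvHStep a c)) % pvMod = pvG (b * 131 + (c.toNat : Int)) v % pvMod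
    apply ih
    rw [pvHStep_eq, Int.emod_emod_of_dvd _ dvd_rfl]
    exact Int.ModEq.add_right _ (Int.ModEq.mul_right 131 h)

lemma pvG_shift : ∀ (v : List Char) (a : Int), pvG a v = a * 131 ^ v.length + pvG 0 v := by
  intro v
  induction v with
  | nil => intro a; simp [pvG]
  | cons c v ih =>
    intro a
    have h1 : pvG a (c :: v) = pvG (a * 131 + (c.toNat : Int)) v := rfl
    have h2 : pvG 0 (c :: v) = pvG ((c.toNat : Int)) v := by
      show pvG ((0 : Int) * 131 + (c.toNat : Int)) v = _
      norm_num
    rw [h1, h2, ih, ih ((c.toNat : Int)), List.length_cons]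
    ring

lemma pvPm_mod (m : Nat) : pvPm m % pvMod = (131 ^ m) % pvMod := by
  induction m with
  | zero => rfl
  | succ m ih =>
    have hstep : pvPm (m + 1) = PySem.Int.mod (pvPm m * 131) pvMod := by
      unfold pvPm
      rw [List.range_succ, List.foldl_append]
      rfl
    rw [hstep, PySem.Int.mod_eq_emod_of_pos pvMod_pos, Int.emod_emod_of_dvd _ dvd_rfl, pow_succ]
    exact Int.ModEq.mul_right 131 ih

lemma pvH_mod_self (eL : List Char) (hm : eL ≠ []) : pvH eL % pvMod = pvH eL := by
  obtain ⟨S, c, rfl⟩ : ∃ S c, eL = S ++ [c] :=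
    ⟨eL.dropLast, eL.getLast hm, (List.dropLast_append_getLast hm).symm⟩
  rw [pvH_append_singleton, pvHStep_mod_self]

lemma pvHash_hit (eL u : List Char) (hm : eL ≠ []) :
    PySem.Int.mod (pvH (u ++ eL) - pvH u * pvPm eL.length) pvMod = pvH eL := by
  rw [PySem.Int.mod_eq_emod_of_pos pvMod_pos]
  have h1 : pvH (u ++ eL) % pvMod = (pvH u * 131 ^ eL.length + pvG 0 eL) % pvMod := by
    have he : pvH (u ++ eL) = eL.foldl pvHStep (pvH u) := by
      simp [pvH, List.foldl_append]
    rw [he, pvG_cong eL (pvH u) (pvH u) rfl, pvG_shift]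
  have h2 : (pvH u * pvPm eL.length) % pvMod = (pvH u * 131 ^ eL.length) % pvMod :=
    Int.ModEq.mul_left _ (pvPm_mod eL.length)
  have h3 : pvG 0 eL % pvMod = pvH eL := by
    rw [← pvG_cong eL 0 0 rfl]
    exact pvH_mod_self eL hm
  have h4 : (pvH (u ++ eL) - pvH u * pvPm eL.length) % pvMod = pvG 0 eL % pvMod := by
    have hA := Int.ModEq.sub h1 h2
    simpa using hA
  rw [h4, h3]

lemma B_step (eL : List Char) (hm : eL ≠ []) (S : List Char) (c : Char) :
    pvStepB eL.length eL (eL.foldl pvHStep 0) (pvPm eL.length) (S, pvPH S) c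
      = (pvStep eL S c, pvPH (pvStep eL S c)) := by
  have hm0 : eL.length ≠ 0 := by simpa using hm
  have hPH : pvPH S ++ [pvHStep (PySem.List.pyGetD (pvPH S) (-1) 0) c] = pvPH (S ++ [c]) := by
    rw [pvPH_last, ← pvH_append_singleton, pvPH_append]
  simp only [pvStepB]
  rw [hPH]
  unfold pvStep pvRed
  by_cases hlen : eL.length ≤ (S ++ [c]).length
  · rw [if_pos ⟨hm0, hlen⟩]
    rw [pvPH_last, pvPH_window (S ++ [c]) eL.length hlen,
        PySem.List.slice_from_neg_natCast (S ++ [c]) eL.length (by omega)]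
    by_cases hsuf : (S ++ [c]).drop ((S ++ [c]).length - eL.length) = eL
    · set u := (S ++ [c]).take ((S ++ [c]).length - eL.length) with hudef
      have hueq : u ++ eL = S ++ [c] := by
        rw [← hsuf]
        exact List.take_append_drop _ _
      have key := pvHash_hit eL u hm
      rw [hueq] at key
      rw [if_pos ⟨key, hsuf⟩, if_pos ⟨hlen, hsuf⟩]
      refine Prod.ext rfl ?_
      show (pvPH (S ++ [c])).take ((pvPH (S ++ [c])).length - eL.length) = _
      rw [pvPH_length, show (S ++ [c]).length + 1 - eL.length = ((S ++ [c]).length - eL.length) + 1 by omega]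
      exact pvPH_take (S ++ [c]) _ (by omega)
    · rw [if_neg (fun hh => hsuf hh.2), if_neg (fun hh => hsuf hh.2)]
  · rw [if_neg (fun hh => hlen hh.2), if_neg (fun hh => hlen hh.1)]

lemma B_fold (eL : List Char) (hm : eL ≠ []) :
    ∀ (l S : List Char),
      l.foldl (pvStepB eL.length eL (eL.foldl pvHStep 0) (pvPm eL.length)) (S, pvPH S)
        = (l.foldl (pvStep eL) S, pvPH (l.foldl (pvStep eL) S)) := by
  intro l
  induction l with
  | nil => intro S; rfl
  | cons c l ih =>
    intro S
    simp only [List.foldl_cons, B_step eL hm S c, ih]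

lemma solution_eq_fin (origin explode : String) :
    solution origin explode =
      (if pvFinA explode.toList (origin.toList.foldl (pvStepA explode.toList) ([], 0)) = []
       then "FRULA"
       else String.ofList (pvFinA explode.toList (origin.toList.foldl (pvStepA explode.toList) ([], 0)))) :=
  rfl

-- ---- the empty-pattern corner ----
lemma pvChkA_nil (S : List Char) : pvChkA S [] = true := by
  simp [pvChkA]

lemma A_fold_nil : ∀ (l S : List Char) (n : Int),
    l.foldl (pvStepA []) (S, n) = (S ++ l, n + l.length) := by
  intro l
  induction l with
  | nil => intro S n; simp
  | cons c l ih =>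
    intro S n
    have hstep : pvStepA [] (S, n) c = (S ++ [c], n + 1) := by
      simp only [pvStepA]
      by_cases hn : ((List.length ([] : List Char) : Nat) : Int) ≤ n
      · rw [if_pos hn, if_pos (pvChkA_nil S)]
        simp
      · rw [if_neg hn]
    rw [List.foldl_cons, hstep, ih]
    refine Prod.ext (by simp) ?_
    simp only [List.length_cons]
    push_cast
    ring

lemma pvFinA_nil (S : List Char) (n : Int) (hn : 0 ≤ n) : pvFinA [] (S, n) = [] := by
  unfold pvFinA
  rw [if_pos ⟨by simpa using hn, pvChkA_nil S⟩]
  rw [show (-1 * ((List.length ([] : List Char) : Nat) : Int)) = 0 by simp]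
  rw [PySem.List.slice_to _ (le_refl (0 : Int))]
  simp

lemma solution_empty (origin : String) : solution origin "" = "FRULA" := by
  have he : ("" : String).toList = ([] : List Char) := by simp
  rw [solution_eq_fin, he, A_fold_nil origin.toList [] 0,
      pvFinA_nil _ _ (by simp)]
  simp

lemma B_fold_nil (t p : Int) : ∀ (l : List Char) (st : List Char × List Int),
    (l.foldl (pvStepB 0 [] t p) st).1 = st.1 ++ l := by
  intro l
  induction l with
  | nil => intro st; simp
  | cons c l ih =>
    intro st
    have hstep : pvStepB 0 [] t p st c
        = (st.1 ++ [c], st.2 ++ [pvHStep (PySem.List.pyGetD st.2 (-1) 0) c]) := by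
      simp only [pvStepB]
      rw [if_neg (fun hh => hh.1 rfl)]
    rw [List.foldl_cons, hstep, ih]
    simp

lemma solution_alt_empty (origin : String) :
    solution_alt origin "" = if origin.toList = [] then "FRULA" else String.ofList origin.toList := by
  have he : ("" : String).toList = ([] : List Char) := by simp
  simp only [solution_alt, he, List.length_nil]
  rw [B_fold_nil _ _ origin.toList ([], [0])]
  simp

-- ---- assembly ----
lemma solution_alt_eq (origin explode : String) (hm : explode.toList ≠ []) :
    solution_alt origin explode =
      (if origin.toList.foldl (pvStep explode.toList) [] = [] then "FRULA"
       else String.ofList (origin.toList.foldl (pvStep explode.toList) [])) := by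
  have h0 : ([0] : List Int) = pvPH [] := rfl
  have hpm : (List.range explode.toList.length).foldl (fun p _ => PySem.Int.mod (p * 131) pvMod) 1
      = pvPm explode.toList.length := rfl
  have hb := B_fold explode.toList hm origin.toList []
  simp only [solution_alt]
  rw [h0, hpm, hb]

lemma main_eq (origin explode : String) (hm : explode ≠ "") :
    solution origin explode = solution_alt origin explode := by
  have hm' : explode.toList ≠ [] := by simpa using hm
  have hred : pvRed explode.toList [] = [] := by
    unfold pvRed
    rw [if_neg]
    intro hh
    have h1 : explode.toList.length ≤ 0 := by simpa using hh.1
    apply hm'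
    cases hcl : explode.toList with
    | nil => rfl
    | cons a t => rw [hcl] at h1; simp at h1
  have ha := A_fold explode.toList hm' origin.toList []
  rw [hred] at ha
  simp only [List.length_nil, Nat.cast_zero] at ha
  rw [solution_eq_fin, ha, solution_alt_eq origin explode hm']

-- ===== VERDICT (by name: the statement is the Claim_ definition above) =====
theorem solution_spec : Claim_unchanged_solution := by
  intro origin explode _ hD
  by_cases he : explode = ""
  · subst he
    rw [solution_empty, solution_alt_empty]
    by_cases h0 : origin = ""
    · simp [h0]
    · have hf : origin = "FRULA" := by
        by_contra hf
        exact hD ⟨rfl, h0, hf⟩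
      subst hf
      simp
  · exact main_eq origin explode he

theorem solution_changed : Claim_changed_solution := by
  unfold Claim_changed_solution; decide

theorem solution_tight : Claim_exact_solution := by
  intro origin explode _ hD
  obtain ⟨he, ho, hf⟩ := hD
  subst he
  rw [solution_empty, solution_alt_empty]
  have : origin.toList ≠ [] := by simpa using ho
  simp [this]
  intro h
  exact hf h.symm
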